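-- pv_equiv track=rewrite | github.com/vrusinov/codechef | practice/2_advanced/copypush/copypush.py | copypush
-- ===== SOURCE A (Python) =====
-- from typing import Literal
--
-- COPY = "c"
--
-- PUSH_BACK = "p"
--
-- def copypush(line: str, prev_op: str = "") -> Literal["yes"] | Literal["no"]:
--     """Copy and Push Back.
--
--     Idea: start from given line and try to apply Anon's actions in reverse.
--     Try splitting or cutting characters from line to see if we can end up
--     in empty string. Keep track of previous actions.
--     """
--     line_len = len(line)
--     if line_len == 0:
--         return "yes"
--     # First, try to see if we can split the string into two equals.
--     if line_len % 2 == 0: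
--         if line[: line_len // 2] == line[line_len // 2 :]:
--             if copypush(line[line_len // 2 :], prev_op=COPY) == "yes":
--                 return "yes"
--     # We tried splitting and it didn't work. Let's see if we can append.
--     if prev_op == PUSH_BACK:
--         return "no"
--     return copypush(line[:-1], PUSH_BACK)
-- ===== SOURCE B (Python) =====
-- def copypush(line: str, prev_op: str = "") -> str:
--     # Greedy loop: whenever the string splits into two equal halves, taking the
--     # half is the only move that can succeed (after dropping a char the length
--     # is odd, so a blocked follow-up can never split); otherwise drop one char,
--     # which blocks the next drop.
--     s, blocked = line, prev_op == "p"
--     while s: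
--         n = len(s)
--         h = n // 2
--         if n % 2 == 0 and s[:h] == s[h:]:
--             s, blocked = s[:h], False
--         elif blocked:
--             return "no"
--         else:
--             s, blocked = s[:-1], True
--     return "yes"
-- ===== Notes on version B (the rewrite author's own statement) =====
-- stated objective: simpler
-- what changed: Replaces A's backtracking recursion (try split, else fall back to dropping a char) by a single greedy while-loop with a blocked flag: when the halves match, taking the half is provably the only move that can succeed, so no backtracking state is kept.
import Mathlib
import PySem

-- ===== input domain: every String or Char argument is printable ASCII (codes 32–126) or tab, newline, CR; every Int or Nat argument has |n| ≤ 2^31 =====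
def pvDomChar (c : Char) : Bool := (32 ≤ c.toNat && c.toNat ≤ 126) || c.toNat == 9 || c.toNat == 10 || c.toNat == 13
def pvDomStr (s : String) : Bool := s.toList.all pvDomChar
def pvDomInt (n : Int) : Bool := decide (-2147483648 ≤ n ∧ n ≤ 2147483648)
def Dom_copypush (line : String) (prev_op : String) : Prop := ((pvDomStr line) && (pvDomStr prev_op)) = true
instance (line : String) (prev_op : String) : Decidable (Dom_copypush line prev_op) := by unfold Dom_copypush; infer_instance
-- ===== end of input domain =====

-- B replaces A's backtracking recursion by a single greedy loop with a `blocked` flag (objective: simpler).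

-- ===== PORT A =====
-- A's recursion, transliterated over the code points of `line`.
def copypushA (l : List Char) (prev_op : String) : String :=
  if hz : l.length = 0 then "yes"
  else
    -- `line[:n//2] == line[n//2:]` and the recursive split attempt
    if h : l.length % 2 = 0 ∧ PySem.List.slice l none (some (Int.ofNat (l.length / 2)))
                       = PySem.List.slice l (some (Int.ofNat (l.length / 2))) none then
      if copypushA (PySem.List.slice l (some (Int.ofNat (l.length / 2))) none) "c" = "yes" then "yes"
      else if prev_op = "p" then "no"
      else copypushA (PySem.List.slice l none (some (-1))) "p"
    else if prev_op = "p" then "no"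
    else copypushA (PySem.List.slice l none (some (-1))) "p"
termination_by l.length
decreasing_by
  · obtain ⟨h1, -⟩ := h
    rw [Int.ofNat_eq_natCast, PySem.List.slice_from_natCast]
    simp only [List.length_drop]; omega
  · simp only [PySem.List.slice_to_neg_one, List.length_dropLast]; omega
  · simp only [PySem.List.slice_to_neg_one, List.length_dropLast]; omega

def copypush (line : String) (prev_op : String) : String :=
  copypushA line.toList prev_op

-- ===== PORT B =====
-- the `while s:` loop of Source B
def copypushB (s : List Char) (blocked : Bool) : String :=
  if hne : s = [] then "yes"
  else
    let n := s.length
    let h := n / 2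
    if _hc : n % 2 = 0 ∧ s.take h = s.drop h then copypushB (s.take h) false
    else if blocked then "no"
    else copypushB s.dropLast true
termination_by s.length
decreasing_by
  · have hl : s.length ≠ 0 := fun h0 => hne (List.length_eq_zero_iff.mp h0)
    simp only [List.length_take]; omega
  · have hl : s.length ≠ 0 := fun h0 => hne (List.length_eq_zero_iff.mp h0)
    simp only [List.length_dropLast]; omega

def copypush_alt (line : String) (prev_op : String) : String :=
  copypushB line.toList (prev_op == "p")

-- ===== PRECONDITION & SPEC =====
def Spec_copypush (line : String) (prev_op : String) (out : String) : Prop := out = copypush_alt line prev_op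
instance (line : String) (prev_op : String) (out : String) : Decidable (Spec_copypush line prev_op out) := by unfold Spec_copypush; infer_instance

-- ===== CLAIM (what is proved, stated in full; the proofs are below) =====
def Claim_equal_copypush : Prop := ∀ (line : String) (prev_op : String), Dom_copypush line prev_op → Spec_copypush line prev_op (copypush line prev_op)

-- ===== LEMMAS AND PROOFS =====

-- B only ever returns "yes" or "no".
lemma copypushB_out (s : List Char) (b : Bool) :
    copypushB s b = "yes" ∨ copypushB s b = "no" := by
  fun_induction copypushB s b
  all_goals first | assumption | simp

-- After a drop the string length is odd, so a blocked B-state on it is "no".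
lemma copypushB_odd_blocked (s : List Char) (hodd : s.length % 2 = 1) :
    copypushB s true = "no" := by
  rw [copypushB]
  have hne : s ≠ [] := by intro h; simp [h] at hodd
  rw [dif_neg hne, dif_neg (by simp [hodd])]
  simp

-- Main equivalence of the two recursions, by strong induction on the length.
lemma copypushA_eq_aux : ∀ (n : Nat) (l : List Char), l.length ≤ n →
    ∀ prev_op, copypushA l prev_op = copypushB l (prev_op == "p") := by
  intro n
  induction n with
  | zero =>
    intro l hl prev_op
    have : l = [] := List.length_eq_zero_iff.mp (Nat.le_zero.mp hl)
    subst this; simp [copypushA, copypushB]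
  | succ n ih =>
    intro l hl prev_op
    rw [copypushA, copypushB]
    by_cases h0 : l = []
    · simp [h0]
    · have hn : l.length ≠ 0 := fun h => h0 (List.length_eq_zero_iff.mp h)
      rw [dif_neg hn, dif_neg h0]
      by_cases hs : l.length % 2 = 0 ∧ l.take (l.length / 2) = l.drop (l.length / 2)
      · -- split succeeds: A tries the half first, B takes it greedily
        have e1 : PySem.List.slice l none (some (Int.ofNat (l.length / 2))) = l.take (l.length / 2) := by
          rw [Int.ofNat_eq_natCast, PySem.List.slice_to_natCast]
        have e2 : PySem.List.slice l (some (Int.ofNat (l.length / 2))) none = l.drop (l.length / 2) := by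
          rw [Int.ofNat_eq_natCast, PySem.List.slice_from_natCast]
        have hs' : l.length % 2 = 0 ∧
            PySem.List.slice l none (some (Int.ofNat (l.length / 2)))
              = PySem.List.slice l (some (Int.ofNat (l.length / 2))) none := by
          rw [e1, e2]; exact hs
        rw [dif_pos hs', dif_pos hs]
        have hlen : (l.drop (l.length / 2)).length ≤ n := by
          simp only [List.length_drop]; omega
        have hIH : copypushA (PySem.List.slice l (some (Int.ofNat (l.length / 2))) none) "c"
            = copypushB (l.drop (l.length / 2)) false := by
          rw [Int.ofNat_eq_natCast, PySem.List.slice_from_natCast]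
          simpa using ih _ hlen "c"
        have hhalf : copypushB (l.take (l.length / 2)) false
            = copypushB (l.drop (l.length / 2)) false := by rw [hs.2]
        rcases copypushB_out (l.drop (l.length / 2)) false with hy | hno
        · rw [hIH, hy, if_pos rfl, hhalf, hy]
        · rw [hIH, hno, if_neg (by decide), hhalf, hno]
          -- A's fallback: both the "p" branch and the drop branch give "no"
          have hdrop : copypushA (PySem.List.slice l none (some (-1))) "p" = "no" := by
            rw [PySem.List.slice_to_neg_one]
            have hlt : l.dropLast.length ≤ n := by
              simp only [List.length_dropLast]; omega
            rw [ih _ hlt "p"]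
            exact copypushB_odd_blocked _ (by simp only [List.length_dropLast]; omega)
          by_cases hp : prev_op = "p"
          · rw [if_pos hp]
          · rw [if_neg hp, hdrop]
      · -- split fails: both drop a character (or are blocked)
        have e1 : PySem.List.slice l none (some (Int.ofNat (l.length / 2))) = l.take (l.length / 2) := by
          rw [Int.ofNat_eq_natCast, PySem.List.slice_to_natCast]
        have e2 : PySem.List.slice l (some (Int.ofNat (l.length / 2))) none = l.drop (l.length / 2) := by
          rw [Int.ofNat_eq_natCast, PySem.List.slice_from_natCast]
        have hs' : ¬ (l.length % 2 = 0 ∧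
            PySem.List.slice l none (some (Int.ofNat (l.length / 2)))
              = PySem.List.slice l (some (Int.ofNat (l.length / 2))) none) := by
          rw [e1, e2]; exact hs
        rw [dif_neg hs', dif_neg hs]
        by_cases hp : prev_op = "p"
        · rw [if_pos hp, hp]; simp
        · have hb : (prev_op == "p") = false := by simpa using hp
          rw [if_neg hp, hb, if_neg (by simp)]
          rw [PySem.List.slice_to_neg_one]
          have hlt : l.dropLast.length ≤ n := by
            simp only [List.length_dropLast]; omega
          rw [ih _ hlt "p"]; simp

-- ===== VERDICT (by name: the statement is the Claim_ definition above) =====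
theorem copypush_spec : Claim_equal_copypush := by
  intro line prev_op _
  unfold Spec_copypush copypush copypush_alt
  exact copypushA_eq_aux line.toList.length _ le_rfl _
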